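-- pv_equiv track=rewrite | github.com/mbh038/PE | PE_0060/primes.py | primesthatsumto
-- ===== SOURCE A (Python) =====
-- def primesthatsumto(n):
--     '''
--     counts the primes less than n whose sum is less than n
--     '''
--     psum=0
--     count=0
--     for p in gen_primes():
--         psum+=p
--         if psum>n:
--             break
--         count+=1
--     return count
--
-- def gen_primes():
--     """ Generate an infinite sequence of prime numbers.
--     """
--     # Maps composites to primes witnessing their compositeness.
--     # This is memory efficient, as the sieve is not "run forward"
--     # indefinitely, but only as long as required by the current
--     # number being tested.
--     #
--     D = {}
--
--     # The running integer that's checked for primeness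
--     q = 2
--
--     while True:
--         if q not in D:
--             # q is a new prime.
--             # Yield it and mark its first multiple that isn't
--             # already marked in previous iterations
--             #
--             yield q
--             D[q * q] = [q]
--         else:
--             # q is composite. D[q] is the list of primes that
--             # divide it. Since we've reached q, we no longer
--             # need it in the map, but we'll mark the next
--             # multiples of its witnesses to prepare for larger
--             # numbers
--             #
--             for p in D[q]:
--                 D.setdefault(p + q, []).append(p)
--             del D[q]
--
--         q += 1
-- ===== SOURCE B (Python) =====
-- def primesthatsumto(n):
--     '''
--     counts the primes less than n whose sum is less than n
--     '''
--     psum = 0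
--     count = 0
--     c = 2
--     while True:
--         if _is_prime(c):
--             psum += c
--             if psum > n:
--                 return count
--             count += 1
--         c += 1
--
-- def _is_prime(c):
--     d = 2
--     while d * d <= c:
--         if c % d == 0:
--             return False
--         d += 1
--     return True
-- ===== Notes on version B (the rewrite author's own statement) =====
-- stated objective: simpler
-- what changed: Replaces the dict-based incremental sieve generator (composite->witness-prime map, setdefault/append bookkeeping) with a stateless trial-division primality test (divisors 2..isqrt(c)) feeding the same accumulate-and-break loop.
import Mathlib
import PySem

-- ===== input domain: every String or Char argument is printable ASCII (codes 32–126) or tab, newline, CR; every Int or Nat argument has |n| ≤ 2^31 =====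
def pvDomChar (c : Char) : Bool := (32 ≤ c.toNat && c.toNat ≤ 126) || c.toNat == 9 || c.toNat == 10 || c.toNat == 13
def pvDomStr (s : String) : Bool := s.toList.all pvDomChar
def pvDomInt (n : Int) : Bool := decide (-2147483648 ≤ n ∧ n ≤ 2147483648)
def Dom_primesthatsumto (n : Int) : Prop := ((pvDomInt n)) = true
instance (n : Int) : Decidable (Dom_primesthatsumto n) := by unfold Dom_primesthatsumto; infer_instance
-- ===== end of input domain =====

-- B replaces A's dict-based incremental-sieve prime generator by a stateless
-- trial-division primality test feeding the same accumulate-and-break loop (objective: simpler).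

-- ===== PORT A =====
-- A's dict D is only ever read by key (q in D, D[q]) and written by key (setdefault/
-- assignment/del); its iteration order is never observed, so Std.HashMap over Int keys
-- is an exact model of the Python dict here (and evaluates in O(1) per operation).
-- One composite step of gen_primes: "for p in D[q]: D.setdefault(p+q, []).append(p); del D[q]"
-- (setdefault(k, []).append(p) writes back (current value or []) ++ [p]).
def pvSieveStep (D : Std.HashMap Int (List Int)) (l : List Int) (q : Int) :
    Std.HashMap Int (List Int) :=
  (l.foldl (fun d p => d.insert (p + q) ((d[(p + q)]?).getD [] ++ [p])) D).erase q

-- The consumer loop fused with the lazy generator: on break, the "D[q*q] = [q]; q += 1"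
-- after the last yield never runs, so the port returns count right there.
-- fuel is only a termination bound on the number of generator iterations (values of q);
-- the Python while-loop is unbounded, and the proof below shows the two ports agree step
-- by step for EQUAL fuel, so the claimed equality does not depend on the bound chosen.
def pvLoopA (n : Int) : Nat → Std.HashMap Int (List Int) → Int → Int → Int → Int
  | 0, _, _, _, count => count
  | f+1, D, q, psum, count =>
    match D[q]? with
    | none =>
      let psum' := psum + q
      if psum' > n then count
      else pvLoopA n f (D.insert (q*q) [q]) (q+1) psum' (count+1)
    | some l => pvLoopA n f (pvSieveStep D l q) (q+1) psum count

def primesthatsumto (n : Int) : Int :=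
  pvLoopA n (2 * n.toNat + 4) ∅ 2 0 0

-- ===== PORT B =====
-- _is_prime's inner loop: d = 2; while d*d <= c: if c % d == 0: return False; d += 1
def pvIsPrimeGo (c d : Int) : Bool :=
  if d * d ≤ c then
    if PySem.Int.mod c d == 0 then false else pvIsPrimeGo c (d+1)
  else true
termination_by (c + 1 - d).toNat
decreasing_by
  rename_i h _
  have hd : d ≤ c := by nlinarith [mul_self_nonneg d, mul_self_nonneg (d-1)]
  omega

def pvIsPrime (c : Int) : Bool := pvIsPrimeGo c 2

-- B's main loop, same fuel convention as pvLoopA (one unit per candidate c).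
def pvLoopB (n : Int) : Nat → Int → Int → Int → Int
  | 0, _, _, count => count
  | f+1, c, psum, count =>
    if pvIsPrime c then
      let psum' := psum + c
      if psum' > n then count
      else pvLoopB n f (c+1) psum' (count+1)
    else pvLoopB n f (c+1) psum count

def primesthatsumto_alt (n : Int) : Int :=
  pvLoopB n (2 * n.toNat + 4) 2 0 0

-- ===== PRECONDITION & SPEC =====
def Spec_primesthatsumto (n : Int) (out : Int) : Prop := out = primesthatsumto_alt n
instance (n : Int) (out : Int) : Decidable (Spec_primesthatsumto n out) := by
  unfold Spec_primesthatsumto; infer_instance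

-- ===== CLAIM (what is proved, stated in full; the proofs are below) =====
def Claim_equal_primesthatsumto : Prop :=
  ∀ (n : Int), Dom_primesthatsumto n → Spec_primesthatsumto n (primesthatsumto n)

-- ===== LEMMAS AND PROOFS =====

-- The canonical content of gen_primes' dict just before q is tested: each already
-- yielded prime p (p < q) witnesses exactly one key m, namely m = p*p while that is
-- still ≥ q, and afterwards the unique multiple of p in [q, q+p).
def pvCanon (q p m : Int) : Prop :=
  2 ≤ p ∧ p.toNat.Prime ∧ p < q ∧
    ((q ≤ p*p ∧ m = p*p) ∨ (p*p < q ∧ p ∣ m ∧ q ≤ m ∧ m < q + p))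

def pvInv (D : Std.HashMap Int (List Int)) (q : Int) : Prop :=
  (∀ (m : Int) (lst : List Int), D[m]? = some lst → lst ≠ []) ∧
  (∀ (m p : Int), p ∈ (D[m]?).getD [] ↔ pvCanon q p m)

lemma pv_getD_insert (D : Std.HashMap Int (List Int)) (k m : Int) (v : List Int) :
    ((D.insert k v)[m]?).getD [] = if k = m then v else (D[m]?).getD [] := by
  rw [Std.HashMap.getElem?_insert]
  by_cases h : k = m <;> simp [h]

lemma pv_mem_fold (q : Int) :
    ∀ (l : List Int) (D : Std.HashMap Int (List Int)) (m p' : Int),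
      p' ∈ ((l.foldl (fun d p => d.insert (p + q) ((d[(p + q)]?).getD [] ++ [p])) D)[m]?).getD []
        ↔ p' ∈ (D[m]?).getD [] ∨ (p' ∈ l ∧ p' + q = m) := by
  intro l
  induction l with
  | nil => simp
  | cons x xs ih =>
    intro D m p'
    simp only [List.foldl_cons]
    rw [ih]
    rw [pv_getD_insert]
    by_cases h : x + q = m
    · subst h
      rw [if_pos rfl]
      simp only [List.mem_append, List.mem_cons, List.not_mem_nil, or_false]
      constructor
      · rintro ((hp | rfl) | ⟨hxs, hq2⟩)
        · exact Or.inl hp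
        · exact Or.inr ⟨Or.inl rfl, rfl⟩
        · exact Or.inr ⟨Or.inr hxs, hq2⟩
      · rintro (hp | ⟨(rfl | hxs), hq2⟩)
        · exact Or.inl (Or.inl hp)
        · exact Or.inl (Or.inr rfl)
        · exact Or.inr ⟨hxs, hq2⟩
    · rw [if_neg h]
      simp only [List.mem_cons]
      constructor
      · rintro (hp | ⟨hxs, hq2⟩)
        · exact Or.inl hp
        · exact Or.inr ⟨Or.inr hxs, hq2⟩
      · rintro (hp | ⟨(rfl | hxs), hq2⟩)
        · exact Or.inl hp
        · exact absurd hq2 h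
        · exact Or.inr ⟨hxs, hq2⟩

lemma pv_mem_sieveStep (D : Std.HashMap Int (List Int)) (l : List Int) (q m p : Int)
    (hm : m ≠ q) :
    (p ∈ ((pvSieveStep D l q)[m]?).getD []) ↔ (p ∈ (D[m]?).getD [] ∨ (p ∈ l ∧ p + q = m)) := by
  unfold pvSieveStep
  rw [Std.HashMap.getElem?_erase, if_neg (by simpa using fun hh => hm hh.symm), pv_mem_fold]

lemma pv_sieveStep_q (D : Std.HashMap Int (List Int)) (l : List Int) (q : Int) :
    (pvSieveStep D l q)[q]? = none := by
  simp [pvSieveStep]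

lemma pv_nonempty_insert (D : Std.HashMap Int (List Int)) (k : Int) (v : List Int)
    (hv : v ≠ []) (h : ∀ (m : Int) (lst : List Int), D[m]? = some lst → lst ≠ []) :
    ∀ (m : Int) (lst : List Int), (D.insert k v)[m]? = some lst → lst ≠ [] := by
  intro m lst hg
  rw [Std.HashMap.getElem?_insert] at hg
  split at hg
  · cases hg; exact hv
  · exact h m lst hg

lemma pv_sieveStep_nonempty (D : Std.HashMap Int (List Int)) (l : List Int) (q : Int)
    (h : ∀ (m : Int) (lst : List Int), D[m]? = some lst → lst ≠ []) :
    ∀ (m : Int) (lst : List Int), (pvSieveStep D l q)[m]? = some lst → lst ≠ [] := by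
  have hfold : ∀ (l : List Int) (D : Std.HashMap Int (List Int)),
      (∀ (m : Int) (lst : List Int), D[m]? = some lst → lst ≠ []) →
      ∀ (m : Int) (lst : List Int), (l.foldl (fun d p => d.insert (p + q) ((d[(p + q)]?).getD [] ++ [p])) D)[m]? = some lst → lst ≠ [] := by
    intro l
    induction l with
    | nil => intro D hD; exact hD
    | cons x xs ih =>
      intro D hD
      simp only [List.foldl_cons]
      exact ih _ (pv_nonempty_insert _ _ _ (by simp) hD)
  intro m lst hg
  rw [pvSieveStep, Std.HashMap.getElem?_erase] at hg
  split at hg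
  · cases hg
  · exact hfold l D h m lst hg

lemma pv_dvd_toNat {p q : Int} (hp : 0 ≤ p) (hq : 0 ≤ q) : p ∣ q ↔ p.toNat ∣ q.toNat := by
  rw [← Int.natCast_dvd_natCast, Int.toNat_of_nonneg hp, Int.toNat_of_nonneg hq]

lemma pv_prime_no_proper_div {p q : Int} (hp : 2 ≤ p) (hlt : p < q)
    (hpr : q.toNat.Prime) (hdvd : p ∣ q) : False := by
  have h := hpr.eq_one_or_self_of_dvd p.toNat ((pv_dvd_toNat (by omega) (by omega)).mp hdvd)
  omega

lemma pv_prime_no_div {c e : Int} (_hc : 2 ≤ c) (hpr : c.toNat.Prime) (he : 2 ≤ e)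
    (hsq : e * e ≤ c) (hdvd : e ∣ c) : False := by
  have hlt : e < c := by nlinarith
  exact pv_prime_no_proper_div he hlt hpr hdvd

lemma pv_prime_not_sq {p q : Int} (hp : 2 ≤ p) (hq : 2 ≤ q)
    (hpr : q.toNat.Prime) (heq : q = p * p) : False :=
  pv_prime_no_div hq hpr hp (le_of_eq heq.symm) ⟨p, heq⟩

lemma pv_sq_inj {p q : Int} (hp : 0 ≤ p) (hq : 0 ≤ q) (h : p * p = q * q) : p = q := by
  rcases lt_trichotomy p q with h1 | h1 | h1
  · nlinarith
  · exact h1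
  · nlinarith

lemma pv_prime_iff_no_witness (q : Int) (hq : 2 ≤ q) :
    q.toNat.Prime ↔ ¬ ∃ p : Int, 2 ≤ p ∧ p.toNat.Prime ∧ p ∣ q ∧ p * p ≤ q := by
  constructor
  · rintro hpr ⟨p, hp2, _, hdvd, hsq⟩
    exact pv_prime_no_div hq hpr hp2 hsq hdvd
  · intro hno
    by_contra hnp
    have h1 : q.toNat ≠ 1 := by omega
    have hmp : q.toNat.minFac.Prime := Nat.minFac_prime h1
    have hmd : q.toNat.minFac ∣ q.toNat := Nat.minFac_dvd q.toNat
    have hms : q.toNat.minFac * q.toNat.minFac ≤ q.toNat := by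
      have := Nat.minFac_sq_le_self (by omega : 0 < q.toNat) hnp
      simpa [Nat.pow_two] using this
    refine hno ⟨(q.toNat.minFac : Int), by exact_mod_cast hmp.two_le, by simpa using hmp, ?_, ?_⟩
    · rw [pv_dvd_toNat (by positivity) (by omega)]
      simpa using hmd
    · have : ((q.toNat.minFac * q.toNat.minFac : Nat) : Int) ≤ ((q.toNat : Nat) : Int) := by
        exact_mod_cast hms
      push_cast at this
      omega

lemma pv_isPrimeGo_iff (c : Int) : ∀ (d : Int), 2 ≤ d →
    (pvIsPrimeGo c d = true ↔ ∀ e : Int, d ≤ e → e * e ≤ c → ¬ e ∣ c) := by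
  intro d
  induction d using pvIsPrimeGo.induct (c := c) with
  | case1 x hle hmod =>
    intro _
    have hdvd : x ∣ c := (PySem.Int.mod_eq_zero_iff_dvd c x).mp (by simpa using hmod)
    rw [pvIsPrimeGo, if_pos hle, if_pos hmod]
    exact ⟨fun h => by simp at h, fun h => absurd hdvd (h x le_rfl hle)⟩
  | case2 x hle hmod ih =>
    intro hx
    have hndvd : ¬ x ∣ c := fun h =>
      hmod (by simpa using (PySem.Int.mod_eq_zero_iff_dvd c x).mpr h)
    rw [pvIsPrimeGo, if_pos hle, if_neg hmod, ih (by omega)]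
    constructor
    · intro h e he hsq
      rcases eq_or_lt_of_le he with rfl | hlt
      · exact fun hdvd => hndvd hdvd
      · exact h e (by omega) hsq
    · intro h e he hsq
      exact h e (by omega) hsq
  | case3 x hle =>
    intro hx
    rw [pvIsPrimeGo, if_neg hle]
    simp only [true_iff]
    intro e he hsq hdvd
    have : x * x ≤ e * e := by nlinarith
    omega

lemma pv_isPrime_iff (c : Int) (hc : 2 ≤ c) : pvIsPrime c = true ↔ c.toNat.Prime := by
  rw [pvIsPrime, pv_isPrimeGo_iff c 2 le_rfl, pv_prime_iff_no_witness c hc]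
  constructor
  · rintro h ⟨p, hp2, _, hdvd, hsq⟩
    exact h p hp2 hsq hdvd
  · intro hno e he hsq hdvd
    have hne1 : e.toNat ≠ 1 := by omega
    have hmp : e.toNat.minFac.Prime := Nat.minFac_prime hne1
    have hmd : (e.toNat.minFac : Int) ∣ e := by
      rw [pv_dvd_toNat (by positivity) (by omega)]
      simpa using Nat.minFac_dvd e.toNat
    have hmle : (e.toNat.minFac : Int) ≤ e := by
      have := Nat.minFac_le (by omega : 0 < e.toNat)
      omega
    have h2 : (2 : Int) ≤ (e.toNat.minFac : Int) := by exact_mod_cast hmp.two_le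
    refine hno ⟨(e.toNat.minFac : Int), h2, by simpa using hmp, hmd.trans hdvd, ?_⟩
    nlinarith

lemma pv_verdictA (D : Std.HashMap Int (List Int)) (q : Int)
    (hInv : pvInv D q) (hq : 2 ≤ q) : (D[q]? = none) ↔ q.toNat.Prime := by
  constructor
  · intro hnone
    rw [pv_prime_iff_no_witness q hq]
    rintro ⟨p, hp2, hpp, hdvd, hsq⟩
    have hcanon : pvCanon q p q := by
      refine ⟨hp2, hpp, by nlinarith, ?_⟩
      by_cases hc : q ≤ p * p
      · exact Or.inl ⟨hc, by omega⟩
      · exact Or.inr ⟨by omega, hdvd, le_rfl, by omega⟩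
    have hmem : p ∈ (D[q]?).getD [] := (hInv.2 q p).mpr hcanon
    rw [hnone] at hmem
    simp at hmem
  · intro hpr
    by_contra hne
    obtain ⟨l, hl⟩ := Option.ne_none_iff_exists'.mp hne
    obtain ⟨p, hp⟩ := List.exists_mem_of_ne_nil l (hInv.1 q l hl)
    have hmem : p ∈ (D[q]?).getD [] := by rw [hl]; exact hp
    obtain ⟨hp2, hpp, hlt, hdisj⟩ := (hInv.2 q p).mp hmem
    rw [pv_prime_iff_no_witness q hq] at hpr
    refine hpr ⟨p, hp2, hpp, ?_, ?_⟩
    · rcases hdisj with ⟨_, heq⟩ | ⟨_, hdvd, _, _⟩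
      · exact ⟨p, heq⟩
      · exact hdvd
    · rcases hdisj with ⟨hle, heq⟩ | ⟨hlt2, _, _, _⟩
      · omega
      · omega

lemma pv_inv_insert (D : Std.HashMap Int (List Int)) (q : Int) (hq : 2 ≤ q)
    (hp : q.toNat.Prime) (hInv : pvInv D q) :
    pvInv (D.insert (q*q) [q]) (q+1) := by
  constructor
  · exact pv_nonempty_insert D (q*q) [q] (by simp) hInv.1
  · intro m p
    rw [pv_getD_insert]
    split
    · next heq =>
      subst heq
      simp only [List.mem_singleton]
      constructor
      · rintro rfl
        exact ⟨hq, hp, by omega, Or.inl ⟨by nlinarith, rfl⟩⟩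
      · rintro ⟨hp2, hpp, hlt, hdisj⟩
        rcases hdisj with ⟨hle, heq⟩ | ⟨hsm, hdvd, hge, hlt2⟩
        · exact pv_sq_inj (by omega) (by omega) heq.symm
        · exfalso; nlinarith
    · next hne =>
      rw [hInv.2 m p]
      constructor
      · rintro ⟨hp2, hpp, hlt, hdisj⟩
        refine ⟨hp2, hpp, by omega, ?_⟩
        rcases hdisj with ⟨hle, heq⟩ | ⟨hsm, hdvd, hge, hlt2⟩
        · left
          refine ⟨?_, heq⟩
          have : q ≠ p * p := fun h => pv_prime_not_sq hp2 hq hp h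
          omega
        · right
          have hmq : m ≠ q := by
            rintro rfl
            exact pv_prime_no_proper_div hp2 hlt hp hdvd
          exact ⟨by omega, hdvd, by omega, by omega⟩
      · rintro ⟨hp2, hpp, hlt, hdisj⟩
        have hplt : p < q := by
          rcases eq_or_lt_of_le (by omega : p ≤ q) with rfl | h
          · exfalso
            rcases hdisj with ⟨hle, heq⟩ | ⟨hsm, _, _, _⟩
            · exact hne heq.symm
            · nlinarith
          · exact h
        refine ⟨hp2, hpp, hplt, ?_⟩
        rcases hdisj with ⟨hle, heq⟩ | ⟨hsm, hdvd, hge, hlt2⟩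
        · exact Or.inl ⟨by omega, heq⟩
        · have hppq : p * p ≠ q := fun h => pv_prime_not_sq hp2 hq hp h.symm
          have hmqp : m ≠ q + p := by
            rintro rfl
            have : p ∣ q := (dvd_add_right (dvd_refl p)).mp (by rwa [add_comm])
            exact pv_prime_no_proper_div hp2 hplt hp this
          exact Or.inr ⟨by omega, hdvd, by omega, by omega⟩

lemma pv_inv_step (D : Std.HashMap Int (List Int)) (l : List Int) (q : Int) (hq : 2 ≤ q)
    (hnp : ¬ q.toNat.Prime) (hget : D[q]? = some l) (hInv : pvInv D q) :
    pvInv (pvSieveStep D l q) (q+1) := by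
  have hlmem : ∀ p, p ∈ l ↔ pvCanon q p q := by
    intro p
    rw [← hInv.2 q p, hget]
    rfl
  constructor
  · exact pv_sieveStep_nonempty D l q hInv.1
  · intro m p
    by_cases hm : m = q
    · subst hm
      rw [pv_sieveStep_q D l m]
      simp only [Option.getD_none, List.not_mem_nil, false_iff]
      rintro ⟨hp2, hpp, hlt, hdisj⟩
      rcases hdisj with ⟨hle, heq⟩ | ⟨_, _, hge, _⟩
      · omega
      · omega
    · rw [pv_mem_sieveStep D l q m p hm, hInv.2 m p, hlmem p]
      constructor
      · rintro (⟨hp2, hpp, hlt, hdisj⟩ | ⟨⟨hp2, hpp, hlt, hdisj⟩, hpq⟩)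
        · refine ⟨hp2, hpp, by omega, ?_⟩
          rcases hdisj with ⟨hle, heq⟩ | ⟨hsm, hdvd, hge, hlt2⟩
          · left
            have : m ≠ q := hm
            omega
          · right
            have hmq : m ≠ q := hm
            exact ⟨by omega, hdvd, by omega, by omega⟩
        · have hpdq : p ∣ q := by
            rcases hdisj with ⟨_, heq⟩ | ⟨_, hdvd, _, _⟩
            · exact ⟨p, heq⟩
            · exact hdvd
          refine ⟨hp2, hpp, by omega, Or.inr ⟨?_, ?_, by omega, by omega⟩⟩
          · rcases hdisj with ⟨hle, heq⟩ | ⟨hsm, _, _, _⟩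
            · omega
            · omega
          · rw [← hpq]
            exact (dvd_add_right (dvd_refl p)).mpr hpdq
      · rintro ⟨hp2, hpp, hlt, hdisj⟩
        have hpq : p ≠ q := by
          rintro rfl
          exact hnp hpp
        have hplt : p < q := by omega
        rcases hdisj with ⟨hle, heq⟩ | ⟨hsm, hdvd, hge, hlt2⟩
        · exact Or.inl ⟨hp2, hpp, hplt, Or.inl ⟨by omega, heq⟩⟩
        · have hple : p * p ≤ q := by omega
          by_cases hdq : p ∣ q
          · right
            have hdsub : p ∣ m - q := dvd_sub hdvd hdq
            have hle2 : p ≤ m - q := Int.le_of_dvd (by omega) hdsub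
            refine ⟨⟨hp2, hpp, hplt, ?_⟩, by omega⟩
            rcases eq_or_lt_of_le hple with heq2 | hlt3
            · exact Or.inl ⟨by omega, heq2.symm⟩
            · exact Or.inr ⟨hlt3, hdq, le_rfl, by omega⟩
          · left
            have hppq : p * p ≠ q := by
              rintro h
              exact hdq ⟨p, h.symm⟩
            have hmqp : m ≠ q + p := by
              rintro rfl
              exact hdq ((dvd_add_right (dvd_refl p)).mp (by rwa [add_comm]))
            exact ⟨hp2, hpp, hplt, Or.inr ⟨by omega, hdvd, by omega, by omega⟩⟩

lemma pv_loop_eq (n : Int) :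
    ∀ (f : Nat) (D : Std.HashMap Int (List Int)) (q psum count : Int),
      2 ≤ q → pvInv D q →
      pvLoopA n f D q psum count = pvLoopB n f q psum count := by
  intro f
  induction f with
  | zero => intro D q psum count _ _; rfl
  | succ f ih =>
    intro D q psum count hq hInv
    by_cases hp : q.toNat.Prime
    · have hnone : D[q]? = none := (pv_verdictA D q hInv hq).mpr hp
      have hb : pvIsPrime q = true := (pv_isPrime_iff q hq).mpr hp
      simp only [pvLoopA, pvLoopB, hnone, hb, if_true]
      split
      · rfl
      · exact ih _ _ _ _ (by omega) (pv_inv_insert D q hq hp hInv)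
    · have hnone : D[q]? ≠ none := fun h => hp ((pv_verdictA D q hInv hq).mp h)
      obtain ⟨l, hl⟩ := Option.ne_none_iff_exists'.mp hnone
      have hb : pvIsPrime q = false := by
        rcases Bool.eq_false_or_eq_true (pvIsPrime q) with h | h
        · exact absurd ((pv_isPrime_iff q hq).mp h) hp
        · exact h
      simp only [pvLoopA, pvLoopB, hl, hb, Bool.false_eq_true, if_false]
      exact ih _ _ _ _ (by omega) (pv_inv_step D l q hq hp hl hInv)

lemma pv_inv_init : pvInv (∅ : Std.HashMap Int (List Int)) 2 := by
  constructor
  · intro m lst h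
    rw [Std.HashMap.getElem?_empty] at h
    cases h
  · intro m p
    rw [Std.HashMap.getElem?_empty]
    simp only [Option.getD_none, List.not_mem_nil, false_iff]
    rintro ⟨h2, _, hlt, _⟩
    omega

-- ===== VERDICT (by name: the statement is the Claim_ definition above) =====
theorem primesthatsumto_spec : Claim_equal_primesthatsumto := by
  intro n _
  unfold Spec_primesthatsumto primesthatsumto primesthatsumto_alt
  exact pv_loop_eq n _ _ 2 0 0 (by norm_num) pv_inv_init
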